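-- pv_equiv track=rewrite | github.com/rampasek/RNArobo | foldfilter/dotknot/BPs_to_CT.py | db_to_ct_brackets
-- ===== SOURCE A (Python) =====
-- def db_to_ct_brackets(structure):
--     """ Function: db_to_ct_brackets()
--
--         Purpose:  Convert dot-bracket notation to CT file notation.
--
--         Input:    Structure given as dot-bracket notation, this may include
--                   pseudoknots with two types of brackets, round brackets or
--                   square brackets.
--
--         Return:   List of base pairs, which will be written to CT file later.
--     """
--     stack_round = []
--     stack_square = []
--
--     base_pairs = []
--
--     """ Scan the structure and put different types of opening brackets on different stacks,
--         i.e. in three different lists. """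
--     for index, element in enumerate(structure):
--         if element == '(':
--             stack_round.append(index + 1)
--         if element == ')':
--             bp = (stack_round.pop(), (index + 1))
--             bp_rev = (bp[1], bp[0])
--             base_pairs.append(bp)
--             base_pairs.append(bp_rev)
--
--         if element == '[':
--             stack_square.append(index + 1)
--         if element == ']':
--             bp = (stack_square.pop(), (index + 1))
--             bp_rev = (bp[1], bp[0])
--             base_pairs.append(bp)
--             base_pairs.append(bp_rev)
--
--     return base_pairs
-- ===== SOURCE B (Python) =====
-- def _pairs(structure, op, cl):
--     """Collect (open_pos, close_pos) pairs for one bracket family only."""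
--     stack = []
--     pairs = []
--     for idx, ch in enumerate(structure):
--         if ch == op:
--             stack.append(idx + 1)
--         elif ch == cl:
--             pairs.append((stack.pop(), idx + 1))
--     return pairs
--
--
-- def db_to_ct_brackets(structure):
--     rounds = _pairs(structure, '(', ')')
--     squares = _pairs(structure, '[', ']')
--     # both lists are increasing in close position; merge them by close position
--     merged = []
--     i = j = 0
--     while i < len(rounds) and j < len(squares):
--         if rounds[i][1] < squares[j][1]:
--             merged.append(rounds[i]); i += 1
--         else:
--             merged.append(squares[j]); j += 1
--     merged.extend(rounds[i:])
--     merged.extend(squares[j:])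
--     out = []
--     for a, b in merged:
--         out.append((a, b))
--         out.append((b, a))
--     return out
-- ===== Notes on version B (the rewrite author's own statement) =====
-- stated objective: alternative
-- what changed: B scans the structure twice, collecting round-bracket and square-bracket pairs independently with one stack each, then merges the two close-sorted pair lists by closing position and finally expands each pair into (open,close),(close,open); A does one fused scan with two stacks emitting both tuples inline.
import Mathlib
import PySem

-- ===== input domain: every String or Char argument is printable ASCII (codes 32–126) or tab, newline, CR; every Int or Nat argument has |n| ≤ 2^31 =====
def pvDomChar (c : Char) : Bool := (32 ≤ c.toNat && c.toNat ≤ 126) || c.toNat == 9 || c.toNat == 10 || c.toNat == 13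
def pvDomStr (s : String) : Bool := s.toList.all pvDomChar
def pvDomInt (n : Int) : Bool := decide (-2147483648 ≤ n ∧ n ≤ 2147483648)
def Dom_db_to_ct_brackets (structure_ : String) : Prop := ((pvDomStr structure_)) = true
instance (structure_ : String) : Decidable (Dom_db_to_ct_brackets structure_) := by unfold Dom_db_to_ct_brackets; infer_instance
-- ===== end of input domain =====

-- B separates the two bracket families into two independent stack scans and merges
-- their close-sorted pair lists, instead of A's single fused scan (objective: alternative).


-- ===== PORT A =====
-- A's single enumerate loop: index threaded explicitly, two stacks (cons = append/pop end),
-- base pairs emitted in loop order as bp, bp_rev.  On ')'/']' with an empty stack Python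
-- raises IndexError (excluded by Pre_); the port skips there.
def pvAemit : List Char → Int → List Int → List Int → List (Int × Int)
  | [], _, _, _ => []
  | c :: rest, i, sr, ss =>
    if c = '(' then pvAemit rest (i + 1) ((i + 1) :: sr) ss
    else if c = ')' then
      match sr with
      | [] => pvAemit rest (i + 1) sr ss        -- Python: IndexError (outside Pre_)
      | t :: sr' => (t, i + 1) :: (i + 1, t) :: pvAemit rest (i + 1) sr' ss
    else if c = '[' then pvAemit rest (i + 1) sr ((i + 1) :: ss)
    else if c = ']' then
      match ss with
      | [] => pvAemit rest (i + 1) sr ss        -- Python: IndexError (outside Pre_)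
      | t :: ss' => (t, i + 1) :: (i + 1, t) :: pvAemit rest (i + 1) sr ss'
    else pvAemit rest (i + 1) sr ss

def db_to_ct_brackets (structure_ : String) : List (Int × Int) :=
  pvAemit structure_.toList 0 [] []

-- ===== PORT B =====
-- B's _pairs: one scan for one bracket family, one stack.
def pvPairs : List Char → Int → Char → Char → List Int → List (Int × Int)
  | [], _, _, _, _ => []
  | c :: rest, i, op, cl, st =>
    if c = op then pvPairs rest (i + 1) op cl ((i + 1) :: st)
    else if c = cl then
      match st with
      | [] => pvPairs rest (i + 1) op cl st     -- Python: IndexError (outside Pre_)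
      | t :: st' => (t, i + 1) :: pvPairs rest (i + 1) op cl st'
    else pvPairs rest (i + 1) op cl st

-- B's two-pointer merge by closing position.
def pvMerge : List (Int × Int) → List (Int × Int) → List (Int × Int)
  | [], qs => qs
  | p :: ps, [] => p :: ps
  | p :: ps, q :: qs =>
    if p.2 < q.2 then p :: pvMerge ps (q :: qs) else q :: pvMerge (p :: ps) qs

-- B's final loop: each pair expanded to (a,b), (b,a).
def pvEmit : List (Int × Int) → List (Int × Int)
  | [] => []
  | (a, b) :: rest => (a, b) :: (b, a) :: pvEmit rest

def db_to_ct_brackets_alt (structure_ : String) : List (Int × Int) :=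
  pvEmit (pvMerge (pvPairs structure_.toList 0 '(' ')' [])
                  (pvPairs structure_.toList 0 '[' ']' []))

-- ===== PRECONDITION & SPEC =====
-- Pre_ excludes exactly the inputs where A raises IndexError: some prefix contains more
-- closing than opening brackets of one family (pop from an empty stack).
def Pre_db_to_ct_brackets (structure_ : String) : Prop :=
  ∀ n, n ≤ structure_.toList.length →
    ((structure_.toList.take n).count ')' ≤ (structure_.toList.take n).count '(' ∧
     (structure_.toList.take n).count ']' ≤ (structure_.toList.take n).count '[')
instance (structure_ : String) : Decidable (Pre_db_to_ct_brackets structure_) := by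
  unfold Pre_db_to_ct_brackets; infer_instance

def pvWitness_db_to_ct_brackets : String := "(.[()]).[]"

def Spec_db_to_ct_brackets (structure_ : String) (out : List (Int × Int)) : Prop := out = db_to_ct_brackets_alt structure_
instance (structure_ : String) (out : List (Int × Int)) : Decidable (Spec_db_to_ct_brackets structure_ out) := by unfold Spec_db_to_ct_brackets; infer_instance

-- ===== CLAIM (what is proved, stated in full; the proofs are below) =====
def Claim_equal_db_to_ct_brackets : Prop := ∀ (structure_ : String), Dom_db_to_ct_brackets structure_ → Pre_db_to_ct_brackets structure_ → Spec_db_to_ct_brackets structure_ (db_to_ct_brackets structure_)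

-- ===== LEMMAS AND PROOFS =====

-- every pair produced by a scan starting at index i closes at position ≥ i + 1
theorem pvPairs_close_lb (l : List Char) (i : Int) (op cl : Char) (st : List Int)
    (q : Int × Int) (hq : q ∈ pvPairs l i op cl st) : i + 1 ≤ q.2 := by
  induction l generalizing i st with
  | nil => simp [pvPairs] at hq
  | cons c rest ih =>
    simp only [pvPairs] at hq
    split at hq
    · have := ih _ _ hq; omega
    · split at hq
      · split at hq
        · have := ih _ _ hq; omega
        · rcases List.mem_cons.1 hq with h | h
          · subst h; simp
          · have := ih _ _ h; omega
      · have := ih _ _ hq; omega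

theorem pvMerge_left (t k : Int) (ps qs : List (Int × Int))
    (h : ∀ q ∈ qs, k < q.2) : pvMerge ((t, k) :: ps) qs = (t, k) :: pvMerge ps qs := by
  cases qs with
  | nil => cases ps <;> simp [pvMerge]
  | cons q qs' =>
    have : k < q.2 := h q (List.mem_cons_self ..)
    simp [pvMerge, this]

theorem pvMerge_right (t k : Int) (ps qs : List (Int × Int))
    (h : ∀ p ∈ ps, k < p.2) : pvMerge ps ((t, k) :: qs) = (t, k) :: pvMerge ps qs := by
  cases ps with
  | nil => simp [pvMerge]
  | cons p ps' =>
    have h1 : k < p.2 := h p (List.mem_cons_self ..)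
    have h2 : ¬ p.2 < k := by omega
    simp [pvMerge, h2]

-- the fused scan equals the merge of the two family scans, for any stacks
theorem pvAemit_eq_merge (l : List Char) (i : Int) (sr ss : List Int) :
    pvAemit l i sr ss =
      pvEmit (pvMerge (pvPairs l i '(' ')' sr) (pvPairs l i '[' ']' ss)) := by
  induction l generalizing i sr ss with
  | nil => simp [pvAemit, pvPairs, pvMerge, pvEmit]
  | cons c rest ih =>
    by_cases h1 : c = '('
    · simp [pvAemit, pvPairs, h1, ih]
    · by_cases h2 : c = ')'
      · cases sr with
        | nil => simp [pvAemit, pvPairs, h2, ih]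
        | cons t sr' =>
          have hlb : ∀ q ∈ pvPairs rest (i + 1) '[' ']' ss, i + 1 < q.2 := by
            intro q hq
            have := pvPairs_close_lb rest (i + 1) '[' ']' ss q hq; omega
          simp [pvAemit, pvPairs, h2, ih, pvMerge_left _ _ _ _ hlb, pvEmit]
      · by_cases h3 : c = '['
        · simp [pvAemit, pvPairs, h3, ih]
        · by_cases h4 : c = ']'
          · cases ss with
            | nil => simp [pvAemit, pvPairs, h4, ih]
            | cons t ss' =>
              have hlb : ∀ p ∈ pvPairs rest (i + 1) '(' ')' sr, i + 1 < p.2 := by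
                intro p hp
                have := pvPairs_close_lb rest (i + 1) '(' ')' sr p hp; omega
              simp [pvAemit, pvPairs, h4, ih, pvMerge_right _ _ _ _ hlb, pvEmit]
          · simp [pvAemit, pvPairs, h1, h2, h3, h4, ih]

-- ===== VERDICT (by name: the statement is the Claim_ definition above) =====
theorem db_to_ct_brackets_spec : Claim_equal_db_to_ct_brackets := by
  intro s _ _
  unfold Spec_db_to_ct_brackets db_to_ct_brackets db_to_ct_brackets_alt
  exact pvAemit_eq_merge _ _ _ _
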